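-- pv_equiv track=rewrite | github.com/rossjjennings/crypto | frieder_luk.py | from_fl
-- ===== SOURCE A (Python) =====
-- def from_fl(pair):
--     '''
--     Given a pair of numbers which constitute the ternary Frieder-Luk encoding
--     of a single integer, determine that integer.
--     '''
--     ones, twos = pair
--     digits = []
--     while ones != 0 or twos != 0:
--         digits.append(2*(twos % 2) + ones % 2)
--         ones //= 2
--         twos //= 2
--
--     out = 0
--     for digit in digits[::-1]:
--         out = 3*out + digit
--     return out
-- ===== SOURCE B (Python) =====
-- def from_fl(pair):
--     '''
--     Given a pair of numbers which constitute the ternary Frieder-Luk encoding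
--     of a single integer, determine that integer.
--     '''
--     ones, twos = pair
--     out = 0
--     place = 1
--     while ones != 0 or twos != 0:
--         out += (2*(twos % 2) + ones % 2) * place
--         place *= 3
--         ones //= 2
--         twos //= 2
--     return out
-- ===== Notes on version B (the rewrite author's own statement) =====
-- stated objective: simpler
-- what changed: Single pass with a running power-of-three place value (LSB-first positional accumulation) instead of building a digit list, reversing it, and evaluating MSB-first by Horner's rule.
import Mathlib
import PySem

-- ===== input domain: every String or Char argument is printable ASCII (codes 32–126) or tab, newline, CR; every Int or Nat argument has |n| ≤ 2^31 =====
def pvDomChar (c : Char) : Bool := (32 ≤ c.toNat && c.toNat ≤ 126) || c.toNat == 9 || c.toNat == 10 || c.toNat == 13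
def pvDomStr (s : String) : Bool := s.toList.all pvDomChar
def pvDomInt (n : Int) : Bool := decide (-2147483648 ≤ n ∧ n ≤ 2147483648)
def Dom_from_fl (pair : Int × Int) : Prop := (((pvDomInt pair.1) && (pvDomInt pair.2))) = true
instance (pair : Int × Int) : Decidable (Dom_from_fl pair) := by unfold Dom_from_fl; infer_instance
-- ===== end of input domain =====

-- B replaces A's digit-list + reversal + MSB-first Horner pass by a single loop accumulating
-- LSB-first with a running power-of-three place value (objective: simpler, constant extra space).

-- ===== PORT A =====
-- A's while loop: collect digits 2*(twos%2) + ones%2, halving both counters.  The fuel argument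
-- only totalizes the loop (ones.toNat + twos.toNat strictly decreases each iteration, so the
-- supplied fuel is never exhausted before the guard fails); on negative input Python's loop
-- never terminates; there the inner guard stops the port (both ports stop identically).
def flDigits : Nat → Int → Int → List Int
  | 0, _, _ => []
  | fuel + 1, ones, twos =>
    if ones ≠ 0 ∨ twos ≠ 0 then
      if ones < 0 ∨ twos < 0 then []  -- totalizing guard: Python diverges here
      else (2 * PySem.Int.mod twos 2 + PySem.Int.mod ones 2) ::
        flDigits fuel (PySem.Int.floordiv ones 2) (PySem.Int.floordiv twos 2)
    else []

def from_fl (pair : Int × Int) : Int :=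
  let ones := pair.1
  let twos := pair.2
  let digits := flDigits (ones.toNat + twos.toNat) ones twos
  (digits.reverse).foldl (fun out digit => 3 * out + digit) 0

-- ===== PORT B =====
-- B's while loop: out += digit * place; place *= 3; halve both counters.  Same fuel totalization.
def flAcc : Nat → Int → Int → Int → Int → Int
  | 0, _, _, out, _ => out
  | fuel + 1, ones, twos, out, place =>
    if ones ≠ 0 ∨ twos ≠ 0 then
      if ones < 0 ∨ twos < 0 then out  -- totalizing guard: Python diverges here
      else flAcc fuel (PySem.Int.floordiv ones 2) (PySem.Int.floordiv twos 2)
        (out + (2 * PySem.Int.mod twos 2 + PySem.Int.mod ones 2) * place) (place * 3)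
    else out

def from_fl_alt (pair : Int × Int) : Int :=
  flAcc (pair.1.toNat + pair.2.toNat) pair.1 pair.2 0 1

-- ===== PRECONDITION & SPEC =====
def Spec_from_fl (pair : Int × Int) (out : Int) : Prop := out = from_fl_alt pair
instance (pair : Int × Int) (out : Int) : Decidable (Spec_from_fl pair out) := by unfold Spec_from_fl; infer_instance

-- ===== CLAIM (what is proved, stated in full; the proofs are below) =====
def Claim_equal_from_fl : Prop := ∀ (pair : Int × Int), Dom_from_fl pair → Spec_from_fl pair (from_fl pair)

-- ===== LEMMAS AND PROOFS =====

-- MSB-first Horner evaluation of the reversed list, as from_fl computes it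
def hornerRev (ds : List Int) : Int := (ds.reverse).foldl (fun out d => 3 * out + d) 0

theorem hornerRev_cons (d : Int) (ds : List Int) :
    hornerRev (d :: ds) = 3 * hornerRev ds + d := by
  simp [hornerRev, List.foldl_append]

theorem flAcc_eq (fuel : Nat) : ∀ (ones twos out place : Int),
    flAcc fuel ones twos out place = out + place * hornerRev (flDigits fuel ones twos) := by
  induction fuel with
  | zero => intro ones twos out place; simp [flAcc, flDigits, hornerRev]
  | succ n ih =>
      intro ones twos out place
      by_cases h1 : ones ≠ 0 ∨ twos ≠ 0
      · by_cases h2 : ones < 0 ∨ twos < 0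
        · rw [flAcc, flDigits, if_pos h1, if_pos h2, if_pos h1, if_pos h2]
          simp [hornerRev]
        · rw [flAcc, flDigits, if_pos h1, if_neg h2, if_pos h1, if_neg h2,
            hornerRev_cons, ih]
          ring
      · rw [flAcc, flDigits, if_neg h1, if_neg h1]; simp [hornerRev]

-- ===== VERDICT (by name: the statement is the Claim_ definition above) =====
theorem from_fl_spec : Claim_equal_from_fl := by
  intro pair _
  show from_fl pair = from_fl_alt pair
  rw [from_fl_alt, flAcc_eq, from_fl]
  simp [hornerRev]
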